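-- pv_equiv track=rewrite | github.com/therake77/ADA_pcs | ADA/pc2/programas/optGame.py | maxGameResult
-- ===== SOURCE A (Python) =====
-- def construir_dp(C:list)->list:
--     n = len(C)
--     dp = [[0 for _ in range(n+1)] for _ in range(n+1)]
--     for i in range(n):
--         dp[i][i+1] = C[i]
--     return dp
--
-- def maxGameResult(C:list)->float:
--     n = len(C)
--     dp = construir_dp(C)
--     for d in range(1,n):
--         for i in range(1,n-d+1):
--             j = d+i
--             s_1 = C[i-1] + min(dp[i+1][j],dp[i][j-1])
--             s_2 = C[j-1] + min(dp[i-1][j-2],dp[i][j-1])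
--             dp[i-1][j] = max(s_1,s_2)
--     return dp[0][n]
-- ===== SOURCE B (Python) =====
-- def maxGameResult(C):
--     # Top-down memoized recursion over half-open intervals [lo, hi) of C,
--     # instead of A's bottom-up (n+1)x(n+1) table filled by diagonals.
--     memo = {}
--
--     def f(lo, hi):
--         if hi - lo <= 0:
--             return 0
--         if hi - lo == 1:
--             return C[lo]
--         key = (lo, hi)
--         if key in memo:
--             return memo[key]
--         m = f(lo + 1, hi - 1)
--         res = max(C[lo] + min(f(lo + 2, hi), m),
--                   C[hi - 1] + min(f(lo, hi - 2), m))
--         memo[key] = res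
--         return res
--
--     return f(0, len(C))
-- ===== Notes on version B (the rewrite author's own statement) =====
-- stated objective: alternative
-- what changed: Replaces A's bottom-up diagonal filling of an (n+1)x(n+1) table with demand-driven top-down recursion f(lo,hi) over intervals, memoized in a dict; only intervals actually reachable from [0,n) are ever computed.
import Mathlib
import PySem

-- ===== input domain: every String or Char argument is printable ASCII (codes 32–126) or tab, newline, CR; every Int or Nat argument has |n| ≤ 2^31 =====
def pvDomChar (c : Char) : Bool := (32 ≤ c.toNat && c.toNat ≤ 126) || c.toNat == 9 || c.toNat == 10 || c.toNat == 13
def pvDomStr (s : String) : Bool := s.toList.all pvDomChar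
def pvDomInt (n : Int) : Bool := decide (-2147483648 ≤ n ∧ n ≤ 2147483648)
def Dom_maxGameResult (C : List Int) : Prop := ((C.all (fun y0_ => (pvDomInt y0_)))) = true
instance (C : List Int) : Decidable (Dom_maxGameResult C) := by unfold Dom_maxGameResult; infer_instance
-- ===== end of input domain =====

-- B replaces A's bottom-up diagonal table with top-down memoized recursion over intervals; alternative decomposition, same asymptotic cost.
-- ===== PORT A =====
-- get/set on the 2-D table; every access A makes is in range, so getD 0 is exact here
def pvGet2 (dp : List (List Int)) (i j : Nat) : Int := (dp.getD i []).getD j 0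
def pvSet2 (dp : List (List Int)) (i j : Nat) (v : Int) : List (List Int) :=
  dp.set i ((dp.getD i []).set j v)

def construirDp (C : List Int) : List (List Int) :=
  let n := C.length
  let dp := (List.range (n+1)).map (fun _ => (List.range (n+1)).map (fun _ => (0 : Int)))
  (List.range n).foldl (fun dp i => pvSet2 dp i (i+1) (C.getD i 0)) dp

def maxGameResult (C : List Int) : Int :=
  let n := C.length
  let dp := construirDp C
  let dp := (List.range' 1 (n-1)).foldl (fun dp d =>
      (List.range' 1 (n-d)).foldl (fun dp i =>
        let j := d + i
        let s1 := C.getD (i-1) 0 + min (pvGet2 dp (i+1) j) (pvGet2 dp i (j-1))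
        let s2 := C.getD (j-1) 0 + min (pvGet2 dp (i-1) (j-2)) (pvGet2 dp i (j-1))
        pvSet2 dp (i-1) j (max s1 s2)) dp) dp
  pvGet2 dp 0 n

-- ===== PORT B =====
-- the inner recursion f(lo, hi) of Source B, threading the memo dict; fuel (≥ hi-lo at every
-- call Source B makes) makes the structural recursion explicit; every list access is in range
def pvF (C : List Int) : Nat → Nat → Nat → PySem.Dict (Nat × Nat) Int →
    Int × PySem.Dict (Nat × Nat) Int
  | 0, _, _, memo => (0, memo)
  | fuel+1, lo, hi, memo =>
    if hi ≤ lo then (0, memo)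
    else if hi - lo = 1 then (C.getD lo 0, memo)
    else match memo.get? (lo, hi) with
      | some v => (v, memo)
      | none =>
        let r1 := pvF C fuel (lo+1) (hi-1) memo
        let r2 := pvF C fuel (lo+2) hi r1.2
        let r3 := pvF C fuel lo (hi-2) r2.2
        let res := max (C.getD lo 0 + min r2.1 r1.1) (C.getD (hi-1) 0 + min r3.1 r1.1)
        (res, r3.2.insert (lo, hi) res)

def maxGameResult_alt (C : List Int) : Int :=
  (pvF C C.length 0 C.length PySem.Dict.empty).1

-- ===== PRECONDITION & SPEC =====
def Spec_maxGameResult (C : List Int) (out : Int) : Prop := out = maxGameResult_alt C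
instance (C : List Int) (out : Int) : Decidable (Spec_maxGameResult C out) := by unfold Spec_maxGameResult; infer_instance

-- ===== CLAIM (what is proved, stated in full; the proofs are below) =====
def Claim_equal_maxGameResult : Prop := ∀ (C : List Int), Dom_maxGameResult C → Spec_maxGameResult C (maxGameResult C)

-- ===== LEMMAS AND PROOFS =====

-- gSpec C lo L is the game value of the interval [lo, lo+L) of C; both ports are proved equal to it
def gSpec : List Int → Nat → Nat → Int
  | _, _, 0 => 0
  | C, lo, 1 => C.getD lo 0
  | C, lo, (L+2) =>
      max (C.getD lo 0 + min (gSpec C (lo+2) L) (gSpec C (lo+1) L))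
          (C.getD (lo+L+1) 0 + min (gSpec C lo L) (gSpec C (lo+1) L))

-- ---- B-side: the memo invariant ----
def pvGood (C : List Int) (memo : PySem.Dict (Nat × Nat) Int) : Prop :=
  ∀ lo hi v, memo.get? (lo, hi) = some v → v = gSpec C lo (hi - lo)

theorem pvF_correct (C : List Int) :
    ∀ (fuel lo hi : Nat) (memo : PySem.Dict (Nat × Nat) Int),
    pvGood C memo → hi - lo ≤ fuel →
    (pvF C fuel lo hi memo).1 = gSpec C lo (hi - lo) ∧ pvGood C (pvF C fuel lo hi memo).2 := by
  intro fuel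
  induction fuel with
  | zero =>
    intro lo hi memo hg hf
    have : hi - lo = 0 := by omega
    rw [pvF, this]
    exact ⟨rfl, hg⟩
  | succ m ih =>
    intro lo hi memo hg hf
    rw [pvF]
    by_cases h0 : hi ≤ lo
    · rw [if_pos h0]
      have : hi - lo = 0 := by omega
      rw [this]
      exact ⟨rfl, hg⟩
    · rw [if_neg h0]
      by_cases h1 : hi - lo = 1
      · rw [if_pos h1, h1]
        exact ⟨rfl, hg⟩
      · rw [if_neg h1]
        cases hm : memo.get? (lo, hi) with
        | some v => exact ⟨hg lo hi v hm, hg⟩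
        | none =>
          simp only
          obtain ⟨M, hM⟩ : ∃ M, hi - lo = M + 2 := ⟨hi - lo - 2, by omega⟩
          have e1 : hi - 1 - (lo + 1) = M := by omega
          have e2 : hi - (lo + 2) = M := by omega
          have e3 : hi - 2 - lo = M := by omega
          have c1 := ih (lo+1) (hi-1) memo hg (by omega)
          have c2 := ih (lo+2) hi _ c1.2 (by omega)
          have c3 := ih lo (hi-2) _ c2.2 (by omega)
          rw [e1] at c1; rw [e2] at c2; rw [e3] at c3
          have hres : max (C.getD lo 0 + min (pvF C m (lo+2) hi (pvF C m (lo+1) (hi-1) memo).2).1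
                                             (pvF C m (lo+1) (hi-1) memo).1)
                          (C.getD (hi-1) 0 + min (pvF C m lo (hi-2) (pvF C m (lo+2) hi (pvF C m (lo+1) (hi-1) memo).2).2).1
                                             (pvF C m (lo+1) (hi-1) memo).1)
              = gSpec C lo (hi - lo) := by
            rw [c1.1, c2.1, c3.1, hM, gSpec, show lo + M + 1 = hi - 1 by omega]
          refine ⟨hres, ?_⟩
          intro a b w hw
          rw [PySem.Dict.get?_insert] at hw
          by_cases hk : ((a, b) : Nat × Nat) = (lo, hi)
          · rw [if_pos hk] at hw
            obtain ⟨rfl, rfl⟩ := Prod.mk.injEq .. ▸ Prod.ext_iff.mp hk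
            simp only [Option.some.injEq] at hw
            rw [← hw]
            exact hres
          · rw [if_neg hk] at hw
            exact c3.2 a b w hw

theorem altEq (C : List Int) : maxGameResult_alt C = gSpec C 0 C.length := by
  unfold maxGameResult_alt
  have h := pvF_correct C C.length 0 C.length PySem.Dict.empty
    (by intro lo hi v hv; simp [PySem.Dict.get?_empty] at hv) (by omega)
  simpa using h.1

-- ---- A-side ----
theorem foldl_range'_inv {A : Type} (P : Nat → A → Prop) (f : A → Nat → A) :
    ∀ (len s : Nat) (a : A), P s a →
    (∀ k b, s ≤ k → k < s + len → P k b → P (k+1) (f b k)) →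
    P (s+len) ((List.range' s len).foldl f a) := by
  intro len
  induction len with
  | zero => intro s a h _; simpa using h
  | succ m ih =>
    intro s a h hstep
    have h1 : P (s+1) (f a s) := hstep s a (le_refl s) (by omega) h
    have := ih (s+1) (f a s) h1 (by intro k b hk hk2 hp; exact hstep k b (by omega) (by omega) hp)
    simpa [List.range'_succ, Nat.add_comm, Nat.add_assoc, Nat.add_left_comm] using this

def pvSh (n : Nat) (dp : List (List Int)) : Prop := dp.length = n+1 ∧ ∀ r ∈ dp, r.length = n+1

theorem pvGetD_set {α : Type} (l : List α) (i a : Nat) (x d : α) :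
    (l.set i x).getD a d = if a = i ∧ a < l.length then x else l.getD a d := by
  simp only [List.getD_eq_getElem?_getD, List.getElem?_set]
  split_ifs with h1 h2 h3 <;> simp_all <;> omega

theorem pvRow_len {n : Nat} {dp : List (List Int)} (hsh : pvSh n dp) {i : Nat} (hi : i < dp.length) :
    (dp.getD i []).length = n+1 := by
  rw [List.getD_eq_getElem?_getD, List.getElem?_eq_getElem hi]
  exact hsh.2 _ (List.getElem_mem hi)

theorem pvSh_set2 {n : Nat} {dp : List (List Int)} (hsh : pvSh n dp) (i j : Nat) (hi : i ≤ n) (v : Int) :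
    pvSh n (pvSet2 dp i j v) := by
  constructor
  · simp [pvSet2, hsh.1]
  · intro r hr
    rcases List.mem_or_eq_of_mem_set hr with h | h
    · exact hsh.2 _ h
    · subst h
      have hlen : dp.length = n+1 := hsh.1
      rw [List.length_set, pvRow_len hsh (by omega)]

theorem pvGet2_set2 {n : Nat} {dp : List (List Int)} (hsh : pvSh n dp) (i j a b : Nat)
    (hi : i ≤ n) (hj : j ≤ n) (v : Int) :
    pvGet2 (pvSet2 dp i j v) a b = if a = i ∧ b = j then v else pvGet2 dp a b := by
  have hlen : dp.length = n+1 := hsh.1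
  unfold pvGet2 pvSet2
  rw [pvGetD_set]
  by_cases ha : a = i
  · subst ha
    rw [if_pos ⟨rfl, by omega⟩, pvGetD_set, pvRow_len hsh (by omega)]
    by_cases hb : b = j
    · subst hb; rw [if_pos ⟨rfl, by omega⟩, if_pos ⟨rfl, rfl⟩]
    · rw [if_neg (by tauto), if_neg (by tauto)]
  · rw [if_neg (by tauto), if_neg (by tauto)]

theorem pvGetD_map_range {α : Type} (f : Nat → α) (d : α) (m j : Nat) :
    ((List.range m).map f).getD j d = if j < m then f j else d := by
  rcases Nat.lt_or_ge j m with h | h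
  · rw [if_pos h]
    simp [List.getD_eq_getElem?_getD, h]
  · rw [if_neg (by omega)]
    simp [List.getD_eq_getElem?_getD, Nat.not_lt.mpr h]

def pvInit0 (C : List Int) (a b : Nat) : Int :=
  if b = a+1 ∧ a < C.length then C.getD a 0 else 0

theorem pvConstruir_spec (C : List Int) :
    pvSh C.length (construirDp C) ∧ ∀ a b, pvGet2 (construirDp C) a b = pvInit0 C a b := by
  set n := C.length with hn
  have base : pvSh n ((List.range (n+1)).map (fun _ => (List.range (n+1)).map (fun _ => (0:Int)))) ∧
      ∀ a b, pvGet2 ((List.range (n+1)).map (fun _ => (List.range (n+1)).map (fun _ => (0:Int)))) a b = 0 := by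
    refine ⟨⟨by simp, ?_⟩, ?_⟩
    · intro r hr
      rcases List.mem_map.mp hr with ⟨_, _, rfl⟩
      simp
    · intro a b
      unfold pvGet2
      rw [pvGetD_map_range]
      split_ifs
      · rw [pvGetD_map_range]; split_ifs <;> rfl
      · rfl
  have main := foldl_range'_inv
    (fun k dp => pvSh n dp ∧ ∀ a b, pvGet2 dp a b = if b = a+1 ∧ a < k then C.getD a 0 else 0)
    (fun dp i => pvSet2 dp i (i+1) (C.getD i 0)) n 0 _
    (by
      refine ⟨base.1, ?_⟩
      intro a b
      rw [base.2 a b]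
      rw [if_neg (by omega)])
    (by
      intro k dp hk hk2 ⟨hsh, hch⟩
      refine ⟨pvSh_set2 hsh _ _ (by omega) _, ?_⟩
      intro a b
      rw [pvGet2_set2 hsh k (k+1) a b (by omega) (by omega)]
      rw [hch a b]
      by_cases h1 : a = k ∧ b = k+1
      · obtain ⟨rfl, rfl⟩ := h1
        rw [if_pos ⟨rfl, rfl⟩, if_pos (by omega)]
      · rw [if_neg h1]
        split_ifs <;> first | rfl | omega)
  rw [← List.range_eq_range'] at main
  refine ⟨by simpa [construirDp] using main.1, ?_⟩
  intro a b
  have := main.2 a b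
  simpa [construirDp, pvInit0] using this

def pvE (C : List Int) (m a b : Nat) : Int :=
  if a ≤ b ∧ b ≤ C.length ∧ b - a ≤ m then gSpec C a (b-a) else pvInit0 C a b

def pvEI (C : List Int) (d i0 a b : Nat) : Int :=
  if a ≤ b ∧ b ≤ C.length ∧ (b - a ≤ d ∨ (b - a = d+1 ∧ a+1 < i0)) then gSpec C a (b-a)
  else pvInit0 C a b

theorem pvE_one (C : List Int) (a b : Nat) : pvGet2 (construirDp C) a b = pvE C 1 a b := by
  rw [(pvConstruir_spec C).2 a b]
  unfold pvE pvInit0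
  split_ifs with h1 h2 h3 <;> try omega
  · have : b - a = 1 := by omega
    rw [this]
    have : b = a + 1 := by omega
    simp [gSpec]
  · have : b - a = 0 := by omega
    rw [this]
    rfl

theorem pvInner_step (C : List Int) (d : Nat) (hd1 : 1 ≤ d) (hdn : d < C.length)
    (i : Nat) (dp : List (List Int)) (hi1 : 1 ≤ i) (hi2 : i < 1 + (C.length - d))
    (hsh : pvSh C.length dp) (hch : ∀ a b, pvGet2 dp a b = pvEI C d i a b) :
    ∀ a b, pvGet2 (pvSet2 dp (i-1) (d+i)
        (max (C.getD (i-1) 0 + min (pvGet2 dp (i+1) (d+i)) (pvGet2 dp i (d+i-1)))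
             (C.getD (d+i-1) 0 + min (pvGet2 dp (i-1) (d+i-2)) (pvGet2 dp i (d+i-1))))) a b
      = pvEI C d (i+1) a b := by
  set n := C.length with hn
  have hr1 : pvGet2 dp (i+1) (d+i) = gSpec C (i+1) (d-1) := by
    rw [hch, pvEI, if_pos (by omega), show d+i-(i+1) = d-1 by omega]
  have hr2 : pvGet2 dp i (d+i-1) = gSpec C i (d-1) := by
    rw [hch, pvEI, if_pos (by omega), show d+i-1-i = d-1 by omega]
  have hr3 : pvGet2 dp (i-1) (d+i-2) = gSpec C (i-1) (d-1) := by
    rw [hch, pvEI, if_pos (by omega), show d+i-2-(i-1) = d-1 by omega]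
  have hv : (max (C.getD (i-1) 0 + min (pvGet2 dp (i+1) (d+i)) (pvGet2 dp i (d+i-1)))
             (C.getD (d+i-1) 0 + min (pvGet2 dp (i-1) (d+i-2)) (pvGet2 dp i (d+i-1))))
      = gSpec C (i-1) (d+1) := by
    rw [hr1, hr2, hr3]
    obtain ⟨M, rfl⟩ : ∃ M, d = M + 1 := ⟨d - 1, by omega⟩
    rw [show M + 1 + 1 = M + 2 from rfl]
    show _ = gSpec C (i-1) (M+2)
    rw [gSpec]
    rw [show i - 1 + 2 = i + 1 by omega, show i - 1 + 1 = i by omega,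
        show i - 1 + M + 1 = M + 1 + i - 1 by omega, show M + 1 - 1 = M from rfl]
  intro a b
  rw [pvGet2_set2 hsh (i-1) (d+i) a b (by omega) (by omega), hv]
  by_cases hab : a = i - 1 ∧ b = d + i
  · obtain ⟨rfl, rfl⟩ := hab
    rw [if_pos ⟨rfl, rfl⟩, pvEI, if_pos (show _ ∧ _ ∧ (_ ∨ _) by omega),
        show d + i - (i-1) = d + 1 by omega]
  · rw [if_neg hab, hch a b]
    unfold pvEI
    split_ifs <;> first | rfl | omega

theorem pvOuter_step (C : List Int) (d : Nat) (hd1 : 1 ≤ d) (hdn : d < C.length)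
    (dp : List (List Int)) (hsh : pvSh C.length dp) (hch : ∀ a b, pvGet2 dp a b = pvE C d a b) :
    pvSh C.length ((List.range' 1 (C.length - d)).foldl (fun dp i =>
        let j := d + i
        let s1 := C.getD (i-1) 0 + min (pvGet2 dp (i+1) j) (pvGet2 dp i (j-1))
        let s2 := C.getD (j-1) 0 + min (pvGet2 dp (i-1) (j-2)) (pvGet2 dp i (j-1))
        pvSet2 dp (i-1) j (max s1 s2)) dp)
    ∧ ∀ a b, pvGet2 ((List.range' 1 (C.length - d)).foldl (fun dp i =>
        let j := d + i
        let s1 := C.getD (i-1) 0 + min (pvGet2 dp (i+1) j) (pvGet2 dp i (j-1))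
        let s2 := C.getD (j-1) 0 + min (pvGet2 dp (i-1) (j-2)) (pvGet2 dp i (j-1))
        pvSet2 dp (i-1) j (max s1 s2)) dp) a b = pvE C (d+1) a b := by
  set n := C.length with hn
  have main := foldl_range'_inv
    (fun i dp => pvSh n dp ∧ ∀ a b, pvGet2 dp a b = pvEI C d i a b)
    (fun dp i =>
        let j := d + i
        let s1 := C.getD (i-1) 0 + min (pvGet2 dp (i+1) j) (pvGet2 dp i (j-1))
        let s2 := C.getD (j-1) 0 + min (pvGet2 dp (i-1) (j-2)) (pvGet2 dp i (j-1))
        pvSet2 dp (i-1) j (max s1 s2)) (n - d) 1 dp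
    (by
      refine ⟨hsh, ?_⟩
      intro a b
      rw [hch a b]
      unfold pvE pvEI
      split_ifs <;> first | rfl | omega)
    (by
      intro k dpk hk hk2 ⟨hshk, hchk⟩
      refine ⟨pvSh_set2 hshk _ _ (by omega) _, ?_⟩
      exact pvInner_step C d hd1 hdn k dpk hk hk2 hshk hchk)
  refine ⟨main.1, ?_⟩
  intro a b
  rw [main.2 a b]
  unfold pvE pvEI
  split_ifs <;> first | rfl | omega

theorem aEq (C : List Int) : maxGameResult C = gSpec C 0 C.length := by
  unfold maxGameResult
  set n := C.length with hn
  rcases Nat.eq_zero_or_pos n with h0 | h1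
  · rw [h0]
    simp only [show (0:Nat) - 1 = 0 from rfl, List.range'_zero, List.foldl_nil]
    rw [pvE_one C 0 0, pvE, if_pos ⟨le_refl 0, by omega, by omega⟩]
  · have main := foldl_range'_inv
      (fun d dp => pvSh n dp ∧ ∀ a b, pvGet2 dp a b = pvE C d a b)
      (fun dp d => (List.range' 1 (n-d)).foldl (fun dp i =>
        let j := d + i
        let s1 := C.getD (i-1) 0 + min (pvGet2 dp (i+1) j) (pvGet2 dp i (j-1))
        let s2 := C.getD (j-1) 0 + min (pvGet2 dp (i-1) (j-2)) (pvGet2 dp i (j-1))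
        pvSet2 dp (i-1) j (max s1 s2)) dp) (n-1) 1 (construirDp C)
      (⟨(pvConstruir_spec C).1, fun a b => pvE_one C a b⟩)
      (by
        intro d dpd hd1 hd2 ⟨hshd, hchd⟩
        exact pvOuter_step C d hd1 (by omega) dpd hshd hchd)
    have h2 := main.2
    rw [show 1 + (n-1) = n by omega] at h2
    rw [h2 0 n, pvE, if_pos (by omega), Nat.sub_zero]

-- ===== VERDICT (by name: the statement is the Claim_ definition above) =====
theorem maxGameResult_spec : Claim_equal_maxGameResult := by
  intro C _
  unfold Spec_maxGameResult
  rw [aEq, altEq]
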